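-- pv_equiv track=rewrite | github.com/Vincent-de-Comarmond/advent-of-code | 2023/Day18/b.py | determine_path
-- ===== SOURCE A (Python) =====
-- from typing import Dict, List, Set, Tuple
--
-- def t_add(*tuples: Tuple[int]) -> Tuple[int]:
--     return tuple(
--         (sum((t[idx] for t in tuples)) for idx in range(max(map(len, tuples))))
--     )
--
-- def determine_path(
--     data_input: List[tuple],
-- ) -> List[Tuple[int]]:
--     point = (0, 0)
--     path = [point]
--     for direction, distance, _ in data_input:
--         for _ in range(distance):
--             point = t_add(point, direction)
--             path.append(point)
--
--     return path
-- ===== SOURCE B (Python) =====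
-- from typing import List, Tuple
--
--
-- def determine_path(
--     data_input: List[tuple],
-- ) -> List[Tuple[int]]:
--     # Stage 1: compute each segment's starting corner by one scaled jump
--     # (range(distance) yields max(distance, 0) unit steps).
--     segments = []
--     x, y = 0, 0
--     for (dx, dy), dist, _ in data_input:
--         steps = max(dist, 0)
--         segments.append(((x, y), (dx, dy), steps))
--         x += steps * dx
--         y += steps * dy
--     # Stage 2: emit each segment's points in closed form (scalar multiples).
--     path = [(0, 0)]
--     for (sx, sy), (dx, dy), steps in segments:
--         path += [(sx + k * dx, sy + k * dy) for k in range(1, steps + 1)]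
--     return path
-- ===== Notes on version B (the rewrite author's own statement) =====
-- stated objective: faster
-- what changed: Instead of A's running prefix sum that repeatedly applies the generic tuple-adder t_add once per unit step, B first computes each segment's start corner by one scaled jump (distance*direction) and then emits every segment's points in closed form as start + k*direction with plain integer arithmetic.
import Mathlib
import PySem

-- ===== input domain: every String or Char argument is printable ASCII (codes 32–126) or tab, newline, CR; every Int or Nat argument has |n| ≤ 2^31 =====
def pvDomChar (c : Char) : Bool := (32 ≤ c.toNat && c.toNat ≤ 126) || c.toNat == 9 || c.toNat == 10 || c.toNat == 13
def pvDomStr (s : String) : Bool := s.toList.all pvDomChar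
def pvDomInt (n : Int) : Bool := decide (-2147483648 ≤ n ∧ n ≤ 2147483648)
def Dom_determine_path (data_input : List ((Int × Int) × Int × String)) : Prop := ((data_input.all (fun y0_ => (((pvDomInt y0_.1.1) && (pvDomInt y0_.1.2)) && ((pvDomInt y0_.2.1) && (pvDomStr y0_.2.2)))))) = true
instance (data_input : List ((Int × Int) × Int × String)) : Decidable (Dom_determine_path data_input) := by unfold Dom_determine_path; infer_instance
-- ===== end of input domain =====

-- B replaces A's running prefix sum of unit steps by two stages: scaled jumps to each
-- segment's start corner, then closed-form points start + k*direction; same cost, no threaded point.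

-- ===== PORT A =====
-- t_add specialised to two 2-tuples (the only way A calls it here): componentwise addition; exact there.
def pvTAdd (p q : Int × Int) : Int × Int := (p.1 + q.1, p.2 + q.2)

-- path.append(point) is ported as the usual cons-accumulator with a final reverse (same values)
def determine_path (data_input : List ((Int × Int) × Int × String)) : List (Int × Int) :=
  (data_input.foldl
    (fun (st : (Int × Int) × List (Int × Int)) ins =>
      (PySem.List.pyRange 0 ins.2.1 1).foldl
        (fun st _ => (pvTAdd st.1 ins.1, pvTAdd st.1 ins.1 :: st.2)) st)
    ((0, 0), [(0, 0)])).2.reverse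

-- ===== PORT B =====
-- stage 1: segments.append(...) as cons+reverse; steps = max(dist, 0); corner advances by steps*direction
-- stage 2: path += [ (sx+k*dx, sy+k*dy) for k in range(1, steps+1) ]
def determine_path_alt (data_input : List ((Int × Int) × Int × String)) : List (Int × Int) :=
  let segments :=
    (data_input.foldl
      (fun (st : (Int × Int) × List ((Int × Int) × (Int × Int) × Int)) ins =>
        let steps : Int := max ins.2.1 0
        ((st.1.1 + steps * ins.1.1, st.1.2 + steps * ins.1.2),
         (st.1, ins.1, steps) :: st.2))
      ((0, 0), [])).2.reverse
  segments.foldl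
    (fun path s =>
      path ++ (PySem.List.pyRange 1 (s.2.2 + 1) 1).map
        (fun k => (s.1.1 + k * s.2.1.1, s.1.2 + k * s.2.1.2)))
    [(0, 0)]

-- ===== PRECONDITION & SPEC =====
def Spec_determine_path (data_input : List ((Int × Int) × Int × String)) (out : List (Int × Int)) : Prop := out = determine_path_alt data_input
instance (data_input : List ((Int × Int) × Int × String)) (out : List (Int × Int)) : Decidable (Spec_determine_path data_input out) := by unfold Spec_determine_path; infer_instance

-- ===== CLAIM (what is proved, stated in full; the proofs are below) =====
def Claim_equal_determine_path : Prop := ∀ (data_input : List ((Int × Int) × Int × String)), Dom_determine_path data_input → Spec_determine_path data_input (determine_path data_input)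

-- ===== LEMMAS AND PROOFS =====

-- proof-only helpers: the common mathematical shape of both results
def pvSegN (pt dir : Int × Int) (n : Nat) : List (Int × Int) :=
  (List.range n).map (fun (k : Nat) => (pt.1 + ((k : Int) + 1) * dir.1, pt.2 + ((k : Int) + 1) * dir.2))

def pvJump (pt dir : Int × Int) (d : Int) : Int × Int :=
  (pt.1 + max d 0 * dir.1, pt.2 + max d 0 * dir.2)

def pvSpec : (Int × Int) → List ((Int × Int) × Int × String) → List (Int × Int)
  | _, [] => []
  | pt, ins :: rest => pvSegN pt ins.1 ins.2.1.toNat ++ pvSpec (pvJump pt ins.1 ins.2.1) rest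

def pvSegs : (Int × Int) → List ((Int × Int) × Int × String) → List ((Int × Int) × (Int × Int) × Int)
  | _, [] => []
  | pt, ins :: rest => (pt, ins.1, max ins.2.1 0) :: pvSegs (pvJump pt ins.1 ins.2.1) rest

def pvFinal (pt : Int × Int) (data : List ((Int × Int) × Int × String)) : Int × Int :=
  data.foldl (fun pt ins => pvJump pt ins.1 ins.2.1) pt

-- the segment step is a shifted copy of the same segment starting one unit later
theorem pvSegN_succ (pt dir : Int × Int) (n : Nat) :
    pvSegN pt dir (n + 1) = pvTAdd pt dir :: pvSegN (pvTAdd pt dir) dir n := by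
  unfold pvSegN
  rw [List.range_succ_eq_map]
  simp only [List.map_cons, List.map_map]
  congr 1
  · simp only [pvTAdd, Prod.mk.injEq]
    push_cast
    constructor <;> ring
  · apply List.map_congr_left
    intro k _
    simp only [Function.comp_apply, pvTAdd, Prod.mk.injEq]
    push_cast
    constructor <;> ring

-- A's inner loop over any list of length n, from point pt with accumulator acc
theorem pv_innerA {β : Type} (dir : Int × Int) :
    ∀ (l : List β) (pt : Int × Int) (acc : List (Int × Int)),
      l.foldl (fun st _ => (pvTAdd st.1 dir, pvTAdd st.1 dir :: st.2)) (pt, acc)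
        = ((pt.1 + (l.length : Int) * dir.1, pt.2 + (l.length : Int) * dir.2),
           (pvSegN pt dir l.length).reverse ++ acc) := by
  intro l
  induction l with
  | nil => intro pt acc; simp [pvSegN]
  | cons a t ih =>
    intro pt acc
    simp only [List.foldl_cons, List.length_cons]
    rw [ih]
    rw [pvSegN_succ]
    simp only [List.reverse_cons, List.append_assoc, List.singleton_append]
    congr 1
    simp only [pvTAdd, Prod.mk.injEq]
    push_cast
    constructor <;> ring

-- A's outer fold: final point and the reversed spec path on top of the accumulator
theorem pv_outerA :
    ∀ (data : List ((Int × Int) × Int × String)) (pt : Int × Int) (acc : List (Int × Int)),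
      data.foldl
        (fun (st : (Int × Int) × List (Int × Int)) ins =>
          (PySem.List.pyRange 0 ins.2.1 1).foldl
            (fun st _ => (pvTAdd st.1 ins.1, pvTAdd st.1 ins.1 :: st.2)) st)
        (pt, acc)
      = (pvFinal pt data, (pvSpec pt data).reverse ++ acc) := by
  intro data
  induction data with
  | nil => intro pt acc; simp [pvFinal, pvSpec]
  | cons ins rest ih =>
    intro pt acc
    simp only [List.foldl_cons]
    rw [pv_innerA ins.1 (PySem.List.pyRange 0 ins.2.1 1) pt acc]
    have hlen : (PySem.List.pyRange 0 ins.2.1 1).length = ins.2.1.toNat := by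
      rw [PySem.List.length_pyRange_one]; omega
    rw [hlen, ih]
    have hmax : ((ins.2.1.toNat : Int)) = max ins.2.1 0 := Int.ofNat_toNat ins.2.1
    rw [hmax]
    simp only [pvFinal, pvSpec, pvJump, List.foldl_cons, List.reverse_append,
      List.append_assoc]

-- B's stage-1 fold: final corner and the reversed segment list on top of the accumulator
theorem pv_stage1 :
    ∀ (data : List ((Int × Int) × Int × String)) (pt : Int × Int)
      (acc : List ((Int × Int) × (Int × Int) × Int)),
      data.foldl
        (fun (st : (Int × Int) × List ((Int × Int) × (Int × Int) × Int)) ins =>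
          let steps : Int := max ins.2.1 0
          ((st.1.1 + steps * ins.1.1, st.1.2 + steps * ins.1.2),
           (st.1, ins.1, steps) :: st.2))
        (pt, acc)
      = (pvFinal pt data, (pvSegs pt data).reverse ++ acc) := by
  intro data
  induction data with
  | nil => intro pt acc; simp [pvFinal, pvSegs]
  | cons ins rest ih =>
    intro pt acc
    simp only [List.foldl_cons]
    rw [ih]
    simp only [pvFinal, pvSegs, pvJump, List.foldl_cons, List.reverse_cons,
      List.append_assoc, List.singleton_append]

-- B's one-segment comprehension equals pvSegN
theorem pv_seg_map (pt dir : Int × Int) (d : Int) :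
    (PySem.List.pyRange 1 (max d 0 + 1) 1).map
        (fun k => (pt.1 + k * dir.1, pt.2 + k * dir.2))
      = pvSegN pt dir d.toNat := by
  rw [PySem.List.pyRange_one]
  have h : (max d 0 + 1 - 1).toNat = d.toNat := by omega
  rw [h, List.map_map]
  unfold pvSegN
  apply List.map_congr_left
  intro k _
  simp only [Function.comp_apply, Prod.mk.injEq]
  constructor <;> ring

-- B's stage-2 fold appends exactly the spec path
theorem pv_stage2 :
    ∀ (data : List ((Int × Int) × Int × String)) (pt : Int × Int) (init : List (Int × Int)),
      (pvSegs pt data).foldl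
        (fun path s =>
          path ++ (PySem.List.pyRange 1 (s.2.2 + 1) 1).map
            (fun k => (s.1.1 + k * s.2.1.1, s.1.2 + k * s.2.1.2)))
        init
      = init ++ pvSpec pt data := by
  intro data
  induction data with
  | nil => intro pt init; simp [pvSegs, pvSpec]
  | cons ins rest ih =>
    intro pt init
    simp only [pvSegs, pvSpec, List.foldl_cons]
    rw [ih]
    rw [pv_seg_map]
    simp [List.append_assoc]

-- ===== VERDICT (by name: the statement is the Claim_ definition above) =====
theorem determine_path_spec : Claim_equal_determine_path := by
  intro data _
  unfold Spec_determine_path determine_path determine_path_alt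
  rw [pv_outerA data (0, 0) [(0, 0)], pv_stage1 data (0, 0) []]
  simp only [List.append_nil, List.reverse_reverse]
  rw [pv_stage2 data (0, 0) [(0, 0)]]
  simp
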